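-- pv_equiv track=rewrite | github.com/rsalek/stock-analysis-RLM | phase0_rlm/tools.py | _filter_chunks
-- ===== SOURCE A (Python) =====
-- from typing import Dict, List, Optional
--
-- def _filter_chunks(chunks: List[Dict], filters: Optional[Dict]) -> List[Dict]:
--     if not filters:
--         return chunks
--     filtered: List[Dict] = []
--     for chunk in chunks:
--         metadata = chunk.get("metadata", {})
--         if all(metadata.get(key) == value for key, value in filters.items()):
--             filtered.append(chunk)
--     return filtered
-- ===== SOURCE B (Python) =====
-- from typing import Dict, List, Optional
--
-- def _filter_chunks(chunks: List[Dict], filters: Optional[Dict]) -> List[Dict]: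
--     if not filters:
--         return chunks
--     result = chunks
--     for key, value in filters.items():
--         result = [c for c in result if c.get("metadata", {}).get(key) == value]
--     return result
-- ===== Notes on version B (the rewrite author's own statement) =====
-- stated objective: alternative
-- what changed: Instead of a single accumulator pass over chunks testing all filter pairs per chunk, B loops over the filter pairs and progressively narrows a working list of chunks, one full pass per filter over a shrinking list.
import Mathlib
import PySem

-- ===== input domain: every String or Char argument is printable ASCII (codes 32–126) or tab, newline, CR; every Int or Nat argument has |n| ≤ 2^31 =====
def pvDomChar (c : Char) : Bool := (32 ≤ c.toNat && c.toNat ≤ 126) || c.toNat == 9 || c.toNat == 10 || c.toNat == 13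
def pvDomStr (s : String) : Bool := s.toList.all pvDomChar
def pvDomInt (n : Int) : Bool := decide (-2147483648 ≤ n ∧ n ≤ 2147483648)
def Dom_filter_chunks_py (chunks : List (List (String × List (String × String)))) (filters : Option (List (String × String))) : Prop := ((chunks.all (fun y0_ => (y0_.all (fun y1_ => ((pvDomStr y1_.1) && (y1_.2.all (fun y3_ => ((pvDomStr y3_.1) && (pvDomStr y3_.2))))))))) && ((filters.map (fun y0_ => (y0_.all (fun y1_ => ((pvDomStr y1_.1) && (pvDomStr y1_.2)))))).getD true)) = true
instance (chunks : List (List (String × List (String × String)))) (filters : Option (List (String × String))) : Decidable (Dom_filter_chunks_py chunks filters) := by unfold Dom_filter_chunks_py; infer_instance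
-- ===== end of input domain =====

-- B replaces A's single accumulator pass (all filter pairs tested per chunk) by a recursive
-- staged narrowing: one pass per filter pair over a shrinking list (alternative decomposition, same cost).
-- ===== PORT A =====
-- dict.get on an association list: first match (exact Python dict lookup via PySem.Dict)
def dget? {α : Type} (d : List (String × α)) (k : String) : Option α :=
  PySem.Dict.get? (PySem.Dict.mk d) k

def filter_chunks_py (chunks : List (List (String × List (String × String)))) (filters : Option (List (String × String))) : List (List (String × List (String × String))) :=
  match filters with
  | none => chunks                              -- `if not filters: return chunks`
  | some fs =>
    if fs.isEmpty then chunks                   -- empty dict is also falsy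
    else
      chunks.foldl (fun filtered chunk =>
        let metadata := (dget? chunk "metadata").getD []
        if fs.all (fun kv => dget? metadata kv.1 == some kv.2)
        then filtered ++ [chunk] else filtered) []

-- ===== PORT B =====
-- `[c for c in result if c.get("metadata", {}).get(key) == value]`, written as the
-- obvious structural recursion the comprehension performs
def keepMatching (key value : String) : List (List (String × List (String × String))) → List (List (String × List (String × String)))
  | [] => []
  | c :: rest =>
    if PySem.Dict.get? (PySem.Dict.mk ((PySem.Dict.get? (PySem.Dict.mk c) "metadata").getD [])) key == some value
    then c :: keepMatching key value rest
    else keepMatching key value rest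

-- `_narrow(result, items)`: recurse on the filter items, narrowing `result` at each step
def narrow (result : List (List (String × List (String × String)))) : List (String × String) → List (List (String × List (String × String)))
  | [] => result
  | (key, value) :: items => narrow (keepMatching key value result) items

def filter_chunks_py_alt (chunks : List (List (String × List (String × String)))) (filters : Option (List (String × String))) : List (List (String × List (String × String))) :=
  match filters with
  | none => chunks        -- `if not filters: return chunks`
  | some [] => chunks     -- empty dict is also falsy
  | some fs => narrow chunks fs

-- ===== PRECONDITION & SPEC =====
def Spec_filter_chunks_py (chunks : List (List (String × List (String × String)))) (filters : Option (List (String × String))) (out : List (List (String × List (String × String)))) : Prop := out = filter_chunks_py_alt chunks filters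
instance (chunks : List (List (String × List (String × String)))) (filters : Option (List (String × String))) (out : List (List (String × List (String × String)))) : Decidable (Spec_filter_chunks_py chunks filters out) := by unfold Spec_filter_chunks_py; infer_instance

-- ===== CLAIM (what is proved, stated in full; the proofs are below) =====
def Claim_equal_filter_chunks_py : Prop := ∀ (chunks : List (List (String × List (String × String)))) (filters : Option (List (String × String))), Dom_filter_chunks_py chunks filters → Spec_filter_chunks_py chunks filters (filter_chunks_py chunks filters)

-- ===== LEMMAS AND PROOFS =====
theorem keepMatching_eq_filter (key value : String) (l : List (List (String × List (String × String)))) :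
    keepMatching key value l
      = l.filter (fun c => PySem.Dict.get? (PySem.Dict.mk ((PySem.Dict.get? (PySem.Dict.mk c) "metadata").getD [])) key == some value) := by
  induction l with
  | nil => rfl
  | cons c rest ih =>
    simp only [keepMatching, List.filter_cons]
    split_ifs with h <;> simp [ih]

theorem narrow_eq_filter_all (fs : List (String × String)) (l : List (List (String × List (String × String)))) :
    narrow l fs = l.filter (fun c => fs.all (fun kv =>
      PySem.Dict.get? (PySem.Dict.mk ((PySem.Dict.get? (PySem.Dict.mk c) "metadata").getD [])) kv.1 == some kv.2)) := by
  induction fs generalizing l with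
  | nil => simp [narrow]
  | cons kv fs ih =>
    obtain ⟨key, value⟩ := kv
    simp only [narrow, ih, keepMatching_eq_filter, List.filter_filter, List.all_cons]
    apply List.filter_congr
    intro c _
    simp [Bool.and_comm]

-- ===== VERDICT (by name: the statement is the Claim_ definition above) =====
theorem filter_chunks_py_spec : Claim_equal_filter_chunks_py := by
  intro chunks filters _
  unfold Spec_filter_chunks_py filter_chunks_py filter_chunks_py_alt
  cases filters with
  | none => rfl
  | some fs =>
    cases fs with
    | nil => rfl
    | cons kv rest =>
      simp only [List.isEmpty_cons, if_neg Bool.false_ne_true]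
      rw [PySem.List.foldl_append_if_eq_filter, narrow_eq_filter_all]
      rfl
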